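-- pv_equiv track=rewrite | github.com/faroh7979/SoftUni-Python | programming_fundamentals/28.Exercise Text Processing/10.winning_ticket.py | ticket_status
-- ===== SOURCE A (Python) =====
-- def ticket_status(ticket: str):
--     wining_symbols = ['@', '#', '$', '^']
--     # copy_wining_symbols = wining_symbols.copy()
--     wining_combos = []
--     current_winning_symbol = ''
--     obtain_winning_symbol = False
--     if len(ticket) != 20:
--         return "invalid ticket"
--     else:
--         left_side = ticket[:10]
--         right_side = ticket[10:]
--         for list_element in wining_symbols:
--             if obtain_winning_symbol:
--                 break
--             if list_element in ticket:
--                 if left_side.count(list_element) > 5 and right_side.count(list_element) > 5: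
--                     current_winning_symbol = list_element
--                     obtain_winning_symbol = True
--                     # copy_wining_symbols.remove(current_winning_symbol)
--                     # for list_element_new in copy_wining_symbols:
--                     #     if list_element_new in ticket:
--                     #         return f'ticket "{ticket}" - no match'
--                 else:
--                     continue
--                 for wining_combo in range(10, 5, -1):
--                     wining_combos.append(current_winning_symbol * wining_combo)
--         if not obtain_winning_symbol:
--             return f'ticket "{ticket}" - no match'
--         if wining_combos[0] in left_side and wining_combos[0] in right_side:
--             return f'ticket "{ticket}" - 10{current_winning_symbol} Jackpot!'
--         else:
--             for matching in range(1, 5):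
--                 if wining_combos[matching] in left_side and wining_combos[matching] in right_side:
--                     return f'ticket "{ticket}" - {10 - matching}{current_winning_symbol}'
--         return f'ticket "{ticket}" - no match'
-- ===== SOURCE B (Python) =====
-- # Simpler decomposition: pick the first symbol with >5 occurrences on each half,
-- # then compute the longest consecutive run per half and branch on min of the runs.
-- def _longest_run(s, ch):
--     best = cur = 0
--     for c in s:
--         cur = cur + 1 if c == ch else 0
--         best = max(best, cur)
--     return best
--
--
-- def ticket_status(ticket: str):
--     if len(ticket) != 20:
--         return "invalid ticket"
--     left, right = ticket[:10], ticket[10:]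
--     symbol = next((s for s in "@#$^" if left.count(s) > 5 and right.count(s) > 5), None)
--     if symbol is None:
--         return f'ticket "{ticket}" - no match'
--     n = min(_longest_run(left, symbol), _longest_run(right, symbol))
--     if n == 10:
--         return f'ticket "{ticket}" - 10{symbol} Jackpot!'
--     if n >= 6:
--         return f'ticket "{ticket}" - {n}{symbol}'
--     return f'ticket "{ticket}" - no match'
-- ===== Notes on version B (the rewrite author's own statement) =====
-- stated objective: simpler
-- what changed: A's flag-driven loop that accumulates a generated list of symbol-repetition strings and probes them as substrings is replaced by a direct decomposition: pick the first symbol with count > 5 on both halves, compute the longest consecutive run per half in one scan each, and branch arithmetically on the minimum of the two runs.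
import Mathlib
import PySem

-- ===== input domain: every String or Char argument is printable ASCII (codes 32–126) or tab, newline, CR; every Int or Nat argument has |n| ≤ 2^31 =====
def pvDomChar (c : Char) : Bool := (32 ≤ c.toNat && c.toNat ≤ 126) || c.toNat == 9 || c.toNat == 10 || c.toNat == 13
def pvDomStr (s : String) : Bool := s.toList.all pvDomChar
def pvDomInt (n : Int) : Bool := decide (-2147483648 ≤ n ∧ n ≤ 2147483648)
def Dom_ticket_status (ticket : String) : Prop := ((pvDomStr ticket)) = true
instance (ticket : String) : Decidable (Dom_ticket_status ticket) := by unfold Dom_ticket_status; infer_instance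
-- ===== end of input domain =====

-- B replaces A's flag-driven loop and generated substring ladder by a direct decomposition:
-- first qualifying symbol (count > 5 on both halves), a longest-run scan per half, min, arithmetic branch.

-- ===== PORT A =====
-- f'ticket "{ticket}" - no match'
def tsA_noMatch (T : List Char) : String :=
  String.ofList ("ticket \"".toList ++ T ++ "\" - no match".toList)

-- the trailing 'for matching in range(1, 5)' loop of A
def tsA_loop (T leftSide rightSide : List Char) (combos : List (List Char))
    (cur : List Char) : List Int → String
  | [] => tsA_noMatch T
  | m :: rest =>
    -- wining_combos[matching]: matching ∈ {1,2,3,4} is always in range when this line is reached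
    if PySem.Chars.isIn (PySem.List.pyGetD combos m []) leftSide ∧
       PySem.Chars.isIn (PySem.List.pyGetD combos m []) rightSide then
      String.ofList ("ticket \"".toList ++ T ++ "\" - ".toList ++
        (PySem.Int.toStr (10 - m)).toList ++ cur)
    else tsA_loop T leftSide rightSide combos cur rest

def ticket_status (ticket : String) : String :=
  let winingSymbols : List (List Char) := [['@'], ['#'], ['$'], ['^']]
  let T := ticket.toList
  if T.length ≠ 20 then "invalid ticket"
  else
    let leftSide := PySem.List.slice T none (some 10)
    let rightSide := PySem.List.slice T (some 10) none
    -- state: (wining_combos, current_winning_symbol, obtain_winning_symbol);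
    -- 'break' ≙ every iteration after the flag is set leaves the state unchanged
    let st := winingSymbols.foldl
      (fun (st : List (List Char) × List Char × Bool) sym =>
        if st.2.2 then st
        else if PySem.Chars.isIn sym T then
          if 5 < PySem.Chars.count leftSide sym ∧ 5 < PySem.Chars.count rightSide sym then
            (st.1 ++ (PySem.List.pyRange 10 5 (-1)).map
               (fun k => (List.replicate k.toNat sym).flatten),  -- sym * k (k ∈ {10,…,6}, positive)
             sym, true)
          else st
        else st)
      ([], [], false)
    let combos := st.1
    let cur := st.2.1
    if st.2.2 = false then tsA_noMatch T
    else if PySem.Chars.isIn (PySem.List.pyGetD combos 0 []) leftSide ∧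
            PySem.Chars.isIn (PySem.List.pyGetD combos 0 []) rightSide then
      String.ofList ("ticket \"".toList ++ T ++ "\" - 10".toList ++ cur ++ " Jackpot!".toList)
    else tsA_loop T leftSide rightSide combos cur (PySem.List.pyRange 1 5 1)

-- ===== PORT B =====
-- _longest_run(s, ch): one pass keeping (cur, best)
def tsB_longestRun (ch : Char) : List Char → Nat → Nat → Nat
  | [], _, best => best
  | x :: t, cur, best =>
    let cur' := if x = ch then cur + 1 else 0
    tsB_longestRun ch t cur' (max best cur')

def ticket_status_alt (ticket : String) : String :=
  let T := ticket.toList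
  if T.length ≠ 20 then "invalid ticket"
  else
    let left := PySem.List.slice T none (some 10)
    let right := PySem.List.slice T (some 10) none
    match "@#$^".toList.find?
        (fun c => decide (5 < PySem.Chars.count left [c]) &&
                  decide (5 < PySem.Chars.count right [c])) with
    | none => String.ofList ("ticket \"".toList ++ T ++ "\" - no match".toList)
    | some c =>
      let n := min (tsB_longestRun c left 0 0) (tsB_longestRun c right 0 0)
      if n = 10 then
        String.ofList ("ticket \"".toList ++ T ++ "\" - 10".toList ++ [c] ++ " Jackpot!".toList)
      else if 6 ≤ n then
        String.ofList ("ticket \"".toList ++ T ++ "\" - ".toList ++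
          (PySem.Int.toStr (n : Int)).toList ++ [c])
      else String.ofList ("ticket \"".toList ++ T ++ "\" - no match".toList)

-- ===== PRECONDITION & SPEC =====
def Spec_ticket_status (ticket : String) (out : String) : Prop := out = ticket_status_alt ticket
instance (ticket : String) (out : String) : Decidable (Spec_ticket_status ticket out) := by unfold Spec_ticket_status; infer_instance

-- ===== CLAIM (what is proved, stated in full; the proofs are below) =====
def Claim_equal_ticket_status : Prop := ∀ (ticket : String), Dom_ticket_status ticket → Spec_ticket_status ticket (ticket_status ticket)

-- ===== LEMMAS AND PROOFS =====

theorem count_singleton_go (c : Char) :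
    ∀ (l : List Char) (fuel acc : Nat), l.length ≤ fuel →
      PySem.Chars.count.go [c] fuel l acc = acc + l.count c := by
  intro l
  induction l with
  | nil => intro fuel acc _; cases fuel <;> simp [PySem.Chars.count.go]
  | cons x t ih =>
    intro fuel acc hf
    cases fuel with
    | zero => simp at hf
    | succ f =>
      by_cases hx : c = x
      · subst hx
        rw [show PySem.Chars.count.go [c] (f + 1) (c :: t) acc
            = PySem.Chars.count.go [c] f t (acc + 1) from by
          simp [PySem.Chars.count.go, List.isPrefixOf]]
        rw [ih f (acc + 1) (by simpa using hf)]
        simp [List.count_cons]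
        omega
      · rw [show PySem.Chars.count.go [c] (f + 1) (x :: t) acc
            = PySem.Chars.count.go [c] f t acc from by
          simp [PySem.Chars.count.go, List.isPrefixOf, hx]]
        rw [ih f acc (by simpa using hf)]
        simp [List.count_cons, show (x == c) = false by simp [Ne.symm hx]]

theorem count_singleton (s : List Char) (c : Char) :
    PySem.Chars.count s [c] = s.count c := by
  rw [show PySem.Chars.count s [c] = PySem.Chars.count.go [c] s.length s 0 from by
    simp [PySem.Chars.count]]
  rw [count_singleton_go c s s.length 0 le_rfl]
  simp

theorem rep_infix_rep (c : Char) (k n : Nat) :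
    List.replicate k c <:+: List.replicate n c ↔ k ≤ n := by
  constructor
  · intro h; simpa using h.length_le
  · intro h
    refine (List.prefix_iff_eq_take.2 ?_).isInfix
    simp [List.take_replicate, Nat.min_eq_left h]

theorem rep_prefix_append (c : Char) (k n : Nat) (t : List Char) (h : k ≤ n) :
    List.replicate k c <+: List.replicate n c ++ t := by
  refine List.IsPrefix.trans ?_ (List.prefix_append _ _)
  exact List.prefix_iff_eq_take.2 (by simp [List.take_replicate, Nat.min_eq_left h])

-- a run of c's cannot cross a non-c character
theorem rep_infix_cross (c x : Char) (hx : x ≠ c) (k : Nat) :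
    ∀ (n : Nat) (t : List Char),
      (List.replicate k c <:+: (List.replicate n c ++ x :: t) ↔
        k ≤ n ∨ List.replicate k c <:+: t) := by
  intro n
  induction n with
  | zero =>
    intro t
    simp only [List.replicate, List.nil_append]
    rw [List.infix_cons_iff]
    constructor
    · rintro (hp | hi)
      · cases k with
        | zero => right; exact List.nil_infix
        | succ m =>
          exfalso
          rcases hp with ⟨r, hr⟩
          rw [List.replicate_succ] at hr
          simp at hr
          exact hx hr.1.symm
      · exact Or.inr hi
    · rintro (hk | hi)
      · interval_cases k; right; exact List.nil_infix
      · exact Or.inr hi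
  | succ n ih =>
    intro t
    rw [List.replicate_succ, List.cons_append, List.infix_cons_iff]
    constructor
    · rintro (hp | hi)
      · left
        by_contra hk
        push_neg at hk
        have hlen : n + 1 < (List.replicate k c).length := by simpa using hk
        have hget := hp.getElem hlen
        have h1 : (List.replicate k c)[n+1]'hlen = c := List.getElem_replicate hlen
        have hform : (c :: (List.replicate n c ++ x :: t)) = List.replicate (n+1) c ++ x :: t := by
          simp [List.replicate_succ]
        have h2 : (c :: (List.replicate n c ++ x :: t))[n+1]'(by simp) = x := by
          simp only [hform]
          rw [List.getElem_append_right (by simp)]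
          simp
        exact hx ((h1.symm.trans hget).trans h2).symm
      · rcases (ih t).1 hi with hk | hi'
        · exact Or.inl (by omega)
        · exact Or.inr hi'
    · rintro (hk | hi)
      · left
        have hform : (c :: (List.replicate n c ++ x :: t)) = List.replicate (n+1) c ++ x :: t := by
          simp [List.replicate_succ]
        rw [hform]
        exact rep_prefix_append c k (n+1) (x :: t) hk
      · right
        exact (ih t).2 (Or.inr hi)

-- scan invariant: the final best dominates k iff best already did or a k-run occurs
theorem longestRun_iff (c : Char) :
    ∀ (s : List Char) (cur best : Nat), cur ≤ best → ∀ k : Nat,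
      (k ≤ tsB_longestRun c s cur best ↔
        k ≤ best ∨ List.replicate k c <:+: (List.replicate cur c ++ s)) := by
  intro s
  induction s with
  | nil =>
    intro cur best hcb k
    simp only [tsB_longestRun, List.append_nil]
    rw [rep_infix_rep]
    omega
  | cons x t ih =>
    intro cur best hcb k
    by_cases hx : x = c
    · subst hx
      rw [show tsB_longestRun x (x :: t) cur best
          = tsB_longestRun x t (cur + 1) (max best (cur + 1)) from by
        simp [tsB_longestRun]]
      rw [ih (cur + 1) (max best (cur + 1)) (le_max_right _ _) k]
      have hlist : List.replicate cur x ++ x :: t = List.replicate (cur + 1) x ++ t := by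
        simp [List.replicate_succ']
      rw [hlist]
      constructor
      · rintro (hk | hi)
        · rcases le_max_iff.1 hk with h | h
          · exact Or.inl h
          · exact Or.inr ((rep_prefix_append x k (cur+1) t h).isInfix)
        · exact Or.inr hi
      · rintro (hk | hi)
        · exact Or.inl (le_max_of_le_left hk)
        · exact Or.inr hi
    · rw [show tsB_longestRun c (x :: t) cur best
          = tsB_longestRun c t 0 (max best 0) from by
        simp [tsB_longestRun, hx]]
      rw [ih 0 (max best 0) (Nat.zero_le _) k]
      rw [rep_infix_cross c x hx k cur t]
      simp only [Nat.max_zero, List.replicate_zero, List.nil_append]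
      constructor
      · rintro (hk | hi)
        · exact Or.inl hk
        · exact Or.inr (Or.inr hi)
      · rintro (hk | hk | hi)
        · exact Or.inl hk
        · exact Or.inl (by omega)
        · exact Or.inr hi

theorem longestRun_iff_isIn (c : Char) (s : List Char) (k : Nat) :
    k ≤ tsB_longestRun c s 0 0 ↔ PySem.Chars.isIn (List.replicate k c) s = true := by
  rw [PySem.Chars.isIn_iff_infix, longestRun_iff c s 0 0 le_rfl k]
  simp only [List.replicate_zero, List.nil_append, Nat.le_zero]
  constructor
  · rintro (h | h)
    · subst h; exact List.nil_infix
    · exact h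
  · exact Or.inr

theorem longestRun_le (c : Char) :
    ∀ (s : List Char) (cur best : Nat),
      tsB_longestRun c s cur best ≤ max best (cur + s.length) := by
  intro s
  induction s with
  | nil => intro cur best; simp [tsB_longestRun]
  | cons x t ih =>
    intro cur best
    simp only [tsB_longestRun]
    by_cases hx : x = c
    · simp only [if_pos hx]
      have := ih (cur + 1) (max best (cur + 1))
      simp only [List.length_cons]
      omega
    · simp only [if_neg hx]
      have := ih 0 (max best 0)
      simp only [List.length_cons]
      omega

-- count(c) > 5 on the first half ⇒ '[c] in ticket' is True
theorem cond_isIn (T : List Char) (c : Char)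
    (h : 5 < PySem.Chars.count (PySem.List.slice T none (some 10)) [c]) :
    PySem.Chars.isIn [c] T = true := by
  rw [PySem.Chars.isIn_iff_infix]
  rw [count_singleton] at h
  have hmem : c ∈ T := by
    have h10 : PySem.List.slice T none (some 10) = T.take 10 := by
      rw [show ((10:Int)) = ((10:Nat):Int) from by norm_num, PySem.List.slice_to_natCast]
    rw [h10] at h
    have hpos : 0 < List.count c (List.take 10 T) := by omega
    exact List.mem_of_mem_take (List.count_pos_iff.1 hpos)
  rcases List.append_of_mem hmem with ⟨l1, l2, rfl⟩
  exact ⟨l1, l2, by simp⟩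

theorem len_left (T : List Char) (h : T.length = 20) :
    (PySem.List.slice T none (some 10)).length = 10 := by
  rw [show ((10:Int)) = ((10:Nat):Int) from by norm_num, PySem.List.slice_to_natCast]
  simp [h]

-- the shared tail: once the winning symbol c is fixed, A's substring ladder equals B's run arithmetic
theorem tail_eq (T : List Char) (c : Char) (h20 : T.length = 20) :
    (if PySem.Chars.isIn (PySem.List.pyGetD ((PySem.List.pyRange 10 5 (-1)).map
          (fun k => (List.replicate k.toNat [c]).flatten)) 0 [])
          (PySem.List.slice T none (some 10)) ∧
        PySem.Chars.isIn (PySem.List.pyGetD ((PySem.List.pyRange 10 5 (-1)).map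
          (fun k => (List.replicate k.toNat [c]).flatten)) 0 [])
          (PySem.List.slice T (some 10) none) then
       String.ofList ("ticket \"".toList ++ T ++ "\" - 10".toList ++ [c] ++ " Jackpot!".toList)
     else tsA_loop T (PySem.List.slice T none (some 10)) (PySem.List.slice T (some 10) none)
       ((PySem.List.pyRange 10 5 (-1)).map (fun k => (List.replicate k.toNat [c]).flatten))
       [c] (PySem.List.pyRange 1 5 1)) =
    (let n := min (tsB_longestRun c (PySem.List.slice T none (some 10)) 0 0)
                  (tsB_longestRun c (PySem.List.slice T (some 10) none) 0 0)
     if n = 10 then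
       String.ofList ("ticket \"".toList ++ T ++ "\" - 10".toList ++ [c] ++ " Jackpot!".toList)
     else if 6 ≤ n then
       String.ofList ("ticket \"".toList ++ T ++ "\" - ".toList ++
         (PySem.Int.toStr (n : Int)).toList ++ [c])
     else String.ofList ("ticket \"".toList ++ T ++ "\" - no match".toList)) := by
  have hcombos : ((PySem.List.pyRange 10 5 (-1)).map
      (fun k => (List.replicate k.toNat [c]).flatten)) =
      [List.replicate 10 c, List.replicate 9 c, List.replicate 8 c,
       List.replicate 7 c, List.replicate 6 c] := by
    rw [show PySem.List.pyRange 10 5 (-1) = [10, 9, 8, 7, 6] from by decide]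
    simp
  rw [hcombos]
  set nL := tsB_longestRun c (PySem.List.slice T none (some 10)) 0 0 with hnL
  set nR := tsB_longestRun c (PySem.List.slice T (some 10) none) 0 0 with hnR
  have hQ : ∀ k : Nat,
      (PySem.Chars.isIn (List.replicate k c) (PySem.List.slice T none (some 10)) = true ∧
       PySem.Chars.isIn (List.replicate k c) (PySem.List.slice T (some 10) none) = true) ↔
      (k ≤ min nL nR) := by
    intro k
    rw [← longestRun_iff_isIn, ← longestRun_iff_isIn, ← hnL, ← hnR]
    omega
  have hnle : min nL nR ≤ 10 := by
    have := longestRun_le c (PySem.List.slice T none (some 10)) 0 0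
    rw [len_left T h20] at this
    rw [hnL]
    omega
  rw [show PySem.List.pyRange 1 5 1 = [1, 2, 3, 4] from by decide]
  simp only [tsA_loop]
  rw [show (PySem.List.pyGetD [List.replicate 10 c, List.replicate 9 c, List.replicate 8 c,
      List.replicate 7 c, List.replicate 6 c] (0:Int) ([]:List Char)) = List.replicate 10 c from rfl]
  rw [show (PySem.List.pyGetD [List.replicate 10 c, List.replicate 9 c, List.replicate 8 c,
      List.replicate 7 c, List.replicate 6 c] (1:Int) ([]:List Char)) = List.replicate 9 c from rfl]
  rw [show (PySem.List.pyGetD [List.replicate 10 c, List.replicate 9 c, List.replicate 8 c,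
      List.replicate 7 c, List.replicate 6 c] (2:Int) ([]:List Char)) = List.replicate 8 c from rfl]
  rw [show (PySem.List.pyGetD [List.replicate 10 c, List.replicate 9 c, List.replicate 8 c,
      List.replicate 7 c, List.replicate 6 c] (3:Int) ([]:List Char)) = List.replicate 7 c from rfl]
  rw [show (PySem.List.pyGetD [List.replicate 10 c, List.replicate 9 c, List.replicate 8 c,
      List.replicate 7 c, List.replicate 6 c] (4:Int) ([]:List Char)) = List.replicate 6 c from rfl]
  simp only [hQ, tsA_noMatch]
  set n := min nL nR with hn
  interval_cases n <;> norm_num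
  
theorem ticket_status_eq (ticket : String) :
    ticket_status ticket = ticket_status_alt ticket := by
  by_cases h20 : ticket.toList.length = 20
  · have hc : ¬(ticket.toList.length ≠ 20) := by simp [h20]
    simp only [ticket_status, ticket_status_alt, if_neg hc]
    have key : ∀ c : Char,
        (5 < PySem.Chars.count (PySem.List.slice ticket.toList none (some 10)) [c] ∧
         5 < PySem.Chars.count (PySem.List.slice ticket.toList (some 10) none) [c]) →
        PySem.Chars.isIn [c] ticket.toList = true := fun c h => cond_isIn _ c h.1
    by_cases h1 : 5 < PySem.Chars.count (PySem.List.slice ticket.toList none (some 10)) ['@'] ∧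
        5 < PySem.Chars.count (PySem.List.slice ticket.toList (some 10) none) ['@']
    · have hin := key '@' h1
      simpa [List.find?, hin, h1.1, h1.2] using tail_eq ticket.toList '@' h20
    · have b1 : (decide (5 < PySem.Chars.count (PySem.List.slice ticket.toList none (some 10)) ['@']) &&
          decide (5 < PySem.Chars.count (PySem.List.slice ticket.toList (some 10) none) ['@'])) = false := by
        rw [← Bool.decide_and]; exact decide_eq_false h1
      by_cases h2 : 5 < PySem.Chars.count (PySem.List.slice ticket.toList none (some 10)) ['#'] ∧
          5 < PySem.Chars.count (PySem.List.slice ticket.toList (some 10) none) ['#']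
      · have hin := key '#' h2
        simpa [List.find?, b1, h1, hin, h2.1, h2.2] using tail_eq ticket.toList '#' h20
      · have b2 : (decide (5 < PySem.Chars.count (PySem.List.slice ticket.toList none (some 10)) ['#']) &&
            decide (5 < PySem.Chars.count (PySem.List.slice ticket.toList (some 10) none) ['#'])) = false := by
          rw [← Bool.decide_and]; exact decide_eq_false h2
        by_cases h3 : 5 < PySem.Chars.count (PySem.List.slice ticket.toList none (some 10)) ['$'] ∧
            5 < PySem.Chars.count (PySem.List.slice ticket.toList (some 10) none) ['$']
        · have hin := key '$' h3
          simpa [List.find?, b1, b2, h1, h2, hin, h3.1, h3.2] using tail_eq ticket.toList '$' h20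
        · have b3 : (decide (5 < PySem.Chars.count (PySem.List.slice ticket.toList none (some 10)) ['$']) &&
              decide (5 < PySem.Chars.count (PySem.List.slice ticket.toList (some 10) none) ['$'])) = false := by
            rw [← Bool.decide_and]; exact decide_eq_false h3
          by_cases h4 : 5 < PySem.Chars.count (PySem.List.slice ticket.toList none (some 10)) ['^'] ∧
              5 < PySem.Chars.count (PySem.List.slice ticket.toList (some 10) none) ['^']
          · have hin := key '^' h4
            simpa [List.find?, b1, b2, b3, h1, h2, h3, hin, h4.1, h4.2] using tail_eq ticket.toList '^' h20
          · have b4 : (decide (5 < PySem.Chars.count (PySem.List.slice ticket.toList none (some 10)) ['^']) &&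
                decide (5 < PySem.Chars.count (PySem.List.slice ticket.toList (some 10) none) ['^'])) = false := by
              rw [← Bool.decide_and]; exact decide_eq_false h4
            simp [List.find?, b1, b2, b3, b4, h1, h2, h3, h4, tsA_noMatch]
  · have h20' : ¬ticket.length = 20 := by
      rw [← String.length_toList]; exact h20
    simp [ticket_status, ticket_status_alt, h20']

-- ===== VERDICT (by name: the statement is the Claim_ definition above) =====
theorem ticket_status_spec : Claim_equal_ticket_status := by
  intro ticket _
  unfold Spec_ticket_status
  exact ticket_status_eq ticket
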